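-- pv_equiv track=rewrite | github.com/Alien-Intelligence/Coderbyte | Coderbyte_Easy_18_KA.py | LetterCountI
-- ===== SOURCE A (Python) =====
-- def LetterCountI(st):
--     li = st.split()
--
--     def check(s):
--         ma = 0
--         for i in str(s):
--             if s.count(i) > ma:
--                 ma = s.count(i)
--         return ma
--
--     sol = []
--     for j in li:
--         sol.append(check(j))
--
--     if sol.count(1) == len(sol):
--         return "-1"
--     else:
--         for k in range(0, len(sol)):
--             if sol[k] == max(sol):
--                 key = k
--                 break
--
--
--                 # code goes here
--         return li[k]
-- ===== SOURCE B (Python) =====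
-- def LetterCountI(st):
--     best_count = 0
--     best_word = None
--     for word in st.split():
--         freq = {}
--         m = 0
--         for ch in word:
--             c = freq.get(ch, 0) + 1
--             freq[ch] = c
--             if c > m:
--                 m = c
--         if m > best_count:
--             best_count = m
--             best_word = word
--     return "-1" if best_count < 2 else best_word
-- ===== Notes on version B (the rewrite author's own statement) =====
-- stated objective: faster
-- what changed: Single pass over the words tracking (best_count, best_word) with a per-word character-frequency dict instead of building a per-word count list via quadratic str.count scans and then re-scanning it against max(sol).
import Mathlib
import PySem

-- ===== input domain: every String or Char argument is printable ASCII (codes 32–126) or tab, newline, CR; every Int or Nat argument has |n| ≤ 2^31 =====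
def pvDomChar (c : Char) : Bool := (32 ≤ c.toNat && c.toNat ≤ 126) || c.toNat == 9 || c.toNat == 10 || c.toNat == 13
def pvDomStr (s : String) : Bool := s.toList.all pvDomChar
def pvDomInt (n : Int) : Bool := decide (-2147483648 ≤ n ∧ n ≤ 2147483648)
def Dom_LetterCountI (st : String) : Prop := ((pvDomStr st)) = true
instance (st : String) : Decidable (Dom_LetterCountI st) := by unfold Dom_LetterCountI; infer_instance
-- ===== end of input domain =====

-- B replaces A's per-word quadratic str.count scans plus a second pass over the
-- count list by a single pass over the words with a per-word frequency dict.

-- ===== PORT A =====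
-- inner helper 'check(s)': running max over 'for i in str(s): if s.count(i) > ma: ma = s.count(i)'
def checkA (s : String) : Int :=
  s.toList.foldl (fun ma i =>
    if ((PySem.Str.count s (String.ofList [i]) : Int)) > ma then ((PySem.Str.count s (String.ofList [i]) : Int)) else ma) 0

def LetterCountI (st : String) : String :=
  let li := PySem.Str.split₀ st
  let sol := li.foldl (fun acc j => acc ++ [checkA j]) []
  if PySem.List.count sol 1 = sol.length then "-1"
  else
    -- 'for k in range(0, len(sol)): if sol[k] == max(sol): key = k; break' then 'return li[k]';
    -- the none branch is the loop falling through, leaving k at len(sol)-1 (unreachable: max(sol) ∈ sol)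
    match sol.findIdx? (fun x => x == (PySem.List.max? sol (fun y => y)).getD 0) with
    | some k => (PySem.List.pyGet? li (k : Int)).getD ""
    | none => (PySem.List.pyGet? li ((sol.length : Int) - 1)).getD ""

-- ===== PORT B =====
-- per-word loop: freq dict + running max m of the current character's new count
def wordMax (w : String) : Int :=
  (w.toList.foldl (fun (acc : PySem.Dict Char Int × Int) ch =>
      let c := acc.1.getD ch 0 + 1
      (acc.1.insert ch c, if c > acc.2 then c else acc.2))
    (PySem.Dict.empty, 0)).2

def LetterCountI_alt (st : String) : String :=
  let r := (PySem.Str.split₀ st).foldl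
    (fun (b : Int × Option String) word =>
      let m := wordMax word
      if m > b.1 then (m, some word) else b) (0, none)
  if r.1 < 2 then "-1" else r.2.getD ""  -- getD default unreachable: r.1 ≥ 2 forces r.2 = some _

-- ===== PRECONDITION & SPEC =====
def Spec_LetterCountI (st : String) (out : String) : Prop := out = LetterCountI_alt st
instance (st : String) (out : String) : Decidable (Spec_LetterCountI st out) := by unfold Spec_LetterCountI; infer_instance

-- ===== CLAIM (what is proved, stated in full; the proofs are below) =====
def Claim_equal_LetterCountI : Prop := ∀ (st : String), Dom_LetterCountI st → Spec_LetterCountI st (LetterCountI st)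

-- ===== LEMMAS AND PROOFS =====

-- running max of base-list letter counts over l
def cntFold (base l : List Char) : Int := l.foldl (fun a c => max a ((base.count c : Int))) 0

-- B's fold step, named for the lemmas (definitionally the lambda in LetterCountI_alt)
def bstep (b : Int × Option String) (word : String) : Int × Option String :=
  let m := wordMax word
  if m > b.1 then (m, some word) else b

lemma countGo_singleton (c : Char) : ∀ (fuel : Nat) (l : List Char) (acc : Nat), l.length ≤ fuel →
    PySem.Chars.count.go [c] fuel l acc = acc + l.count c := by
  intro fuel
  induction fuel with
  | zero =>
    intro l acc h
    have : l = [] := by cases l <;> simp_all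
    subst this
    rw [PySem.Chars.count.go.eq_def]; simp
  | succ n ih =>
    intro l acc h
    cases l with
    | nil => rw [PySem.Chars.count.go.eq_def]; simp
    | cons hd t =>
      rw [PySem.Chars.count.go.eq_def]
      by_cases hc : hd = c
      · subst hc
        have hp : [hd].isPrefixOf (hd :: t) = true := by simp [List.isPrefixOf]
        simp only [hp, if_pos, List.length_cons, List.length_singleton, List.drop_succ_cons, List.drop_zero]
        rw [show List.drop ([] : List Char).length t = t by simp]
        rw [ih t (acc+1) (by simp at h; omega)]
        simp [List.count_cons]
        omega
      · have hp : [c].isPrefixOf (hd :: t) = false := by simp [List.isPrefixOf]; exact fun h' => hc h'.symm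
        simp only [hp]
        rw [ih t acc (by simp at h; omega)]
        simp [List.count_cons, hc]

lemma count_single (l : List Char) (c : Char) : PySem.Chars.count l [c] = l.count c := by
  rw [PySem.Chars.count]
  simp only [List.isEmpty_cons, Bool.false_eq_true, if_false]
  exact (countGo_singleton c l.length l 0 le_rfl).trans (by omega)

lemma checkA_eq (s : String) : checkA s = cntFold s.toList s.toList := by
  unfold checkA cntFold
  congr 1
  funext ma i
  rw [PySem.Str.count_eq]
  simp only [String.toList_ofList]
  rw [count_single]
  rcases le_or_gt ((s.toList.count i : Int)) ma with h | h
  · rw [if_neg (by omega), max_eq_left h]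
  · rw [if_pos (by omega), max_eq_right h.le]

lemma foldl_max_le {β : Type} (f : β → Int) (b : Int) :
    ∀ (xs : List β) (a : Int), a ≤ b → (∀ x ∈ xs, f x ≤ b) →
    xs.foldl (fun acc y => max acc (f y)) a ≤ b := by
  intro xs
  induction xs with
  | nil => intro a ha _; simpa using ha
  | cons x t ih =>
    intro a ha h
    simp only [List.foldl_cons]
    exact ih _ (max_le ha (h x (by simp))) (fun y hy => h y (by simp [hy]))

lemma foldl_max_mono {β : Type} (f g : β → Int) :
    ∀ (xs : List β) (a a' : Int), a ≤ a' → (∀ x ∈ xs, f x ≤ g x) →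
    xs.foldl (fun acc y => max acc (f y)) a ≤ xs.foldl (fun acc y => max acc (g y)) a' := by
  intro xs
  induction xs with
  | nil => intro a a' ha _; simpa using ha
  | cons x t ih =>
    intro a a' ha h
    simp only [List.foldl_cons]
    exact ih _ _ (max_le_max ha (h x (by simp))) (fun y hy => h y (by simp [hy]))

lemma foldl_max_of_le {β : Type} (f : β → Int) :
    ∀ (xs : List β) (a : Int), (∀ x ∈ xs, f x ≤ a) →
    xs.foldl (fun acc y => max acc (f y)) a = a := by
  intro xs
  induction xs with
  | nil => intro a _; rfl
  | cons x t ih =>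
    intro a h
    simp only [List.foldl_cons, max_eq_left (h x (by simp))]
    exact ih _ (fun y hy => h y (by simp [hy]))

lemma cntFold_nonneg (base l : List Char) : 0 ≤ cntFold base l :=
  (PySem.List.le_foldl_max_int l (fun c => (base.count c : Int)) 0).1

lemma le_cntFold (base l : List Char) {c : Char} (hc : c ∈ l) : (base.count c : Int) ≤ cntFold base l :=
  (PySem.List.le_foldl_max_int l (fun c => (base.count c : Int)) 0).2 c hc

lemma cntMax_append (p : List Char) (ch : Char) :
    cntFold (p ++ [ch]) (p ++ [ch]) = max (cntFold p p) ((p.count ch : Int) + 1) := by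
  have hcount : ∀ x, ((p ++ [ch]).count x : Int) = (p.count x : Int) + (if x = ch then 1 else 0) := by
    intro x
    by_cases hx : x = ch
    · subst hx; simp [List.count_append]
    · simp [List.count_append, List.count_singleton', hx, Ne.symm hx]
  have hfin : ((p ++ [ch]).count ch : Int) = (p.count ch : Int) + 1 := by
    rw [hcount]; simp
  -- split the outer fold at the last element
  have hsplit : cntFold (p ++ [ch]) (p ++ [ch])
      = max (cntFold (p ++ [ch]) p) ((p.count ch : Int) + 1) := by
    unfold cntFold
    rw [List.foldl_append]
    simp [hfin]
  rw [hsplit]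
  have h1 : cntFold p p ≤ cntFold (p ++ [ch]) p := by
    unfold cntFold
    exact foldl_max_mono _ _ p 0 0 le_rfl (fun x _ => by rw [hcount]; split <;> omega)
  have h2 : cntFold (p ++ [ch]) p ≤ max (cntFold p p) ((p.count ch : Int) + 1) := by
    unfold cntFold
    apply foldl_max_le
    · exact le_max_of_le_left (cntFold_nonneg p p)
    · intro x hx
      rw [hcount]
      by_cases hxc : x = ch
      · simp only [hxc, if_pos rfl]
        have : (p.count ch : Int) ≤ (p.count ch : Int) + 1 := by omega
        exact le_max_of_le_right (by omega)
      · simp only [hxc, if_neg hxc, add_zero]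
        exact le_max_of_le_left (le_cntFold p p hx)
  exact le_antisymm (max_le_max h2 le_rfl |>.trans (by simp [max_assoc])) (max_le_max h1 le_rfl)

lemma wordLoop : ∀ (l p : List Char) (d : PySem.Dict Char Int) (m : Int),
    (∀ c, d.getD c 0 = (p.count c : Int)) → m = cntFold p p →
    (l.foldl (fun (acc : PySem.Dict Char Int × Int) ch =>
        let c := acc.1.getD ch 0 + 1
        (acc.1.insert ch c, if c > acc.2 then c else acc.2)) (d, m)).2
      = cntFold (p ++ l) (p ++ l) := by
  intro l
  induction l with
  | nil => intro p d m _ hm; simpa using hm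
  | cons ch t ih =>
    intro p d m hd hm
    simp only [List.foldl_cons, hd ch]
    have hif : (if (p.count ch : Int) + 1 > m then (p.count ch : Int) + 1 else m)
        = cntFold (p ++ [ch]) (p ++ [ch]) := by
      rw [cntMax_append, hm]
      rcases le_or_gt ((p.count ch : Int) + 1) (cntFold p p) with h | h
      · rw [if_neg (by omega), max_eq_left h]
      · rw [if_pos (by omega), max_eq_right h.le]
    rw [hif]
    rw [ih (p ++ [ch]) _ _ ?_ rfl]
    · simp only [List.append_assoc, List.singleton_append]
    · intro c
      rw [PySem.Dict.getD_insert]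
      by_cases hc : c = ch
      · subst hc; simp [List.count_append]
      · rw [if_neg hc, hd c]
        have h0 : List.count c [ch] = 0 := by
          rw [List.count_singleton']
          simp [Ne.symm hc]
        rw [List.count_append, h0]
        simp

lemma wordMax_eq : wordMax = checkA := by
  funext w
  rw [checkA_eq, wordMax]
  have := wordLoop w.toList [] PySem.Dict.empty 0
    (fun c => by simp [PySem.Dict.getD, PySem.Dict.get?, PySem.Dict.empty]) rfl
  simpa using this

lemma checkA_pos (w : String) (h : w.toList ≠ []) : 1 ≤ checkA w := by
  rw [checkA_eq]
  obtain ⟨c, hc⟩ := List.exists_mem_of_ne_nil w.toList h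
  have h1 := (PySem.List.le_foldl_max_int w.toList (fun c => (w.toList.count c : Int)) 0).2 c hc
  have h2 : 1 ≤ w.toList.count c := List.one_le_count_iff.mpr hc
  unfold cntFold
  omega

lemma splitGo_ne_nil : ∀ (s cur : List Char) (acc : List (List Char)),
    (∀ l ∈ acc, l ≠ []) → ∀ l ∈ PySem.Chars.split₀.go s cur acc, l ≠ [] := by
  intro s
  induction s with
  | nil =>
    intro cur acc hacc l hl
    rw [PySem.Chars.split₀.go.eq_def] at hl
    dsimp only at hl
    by_cases hcur : cur.isEmpty
    · rw [if_pos hcur] at hl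
      exact hacc l (List.mem_reverse.mp hl)
    · rw [if_neg hcur] at hl
      rcases List.mem_cons.mp (List.mem_reverse.mp hl) with h | h
      · subst h; simpa using fun he => hcur (by simp [he])
      · exact hacc l h
  | cons c rest ih =>
    intro cur acc hacc l hl
    rw [PySem.Chars.split₀.go.eq_def] at hl
    dsimp only at hl
    by_cases hsp : PySem.Chars.isspace c
    · rw [if_pos hsp] at hl
      by_cases hcur : cur.isEmpty
      · rw [if_pos hcur] at hl
        exact ih [] acc hacc l hl
      · rw [if_neg hcur] at hl
        refine ih [] (cur.reverse :: acc) ?_ l hl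
        intro l' hl'
        rcases List.mem_cons.mp hl' with h | h
        · subst h; simpa using fun he => hcur (by simp [he])
        · exact hacc l' h
    · rw [if_neg hsp] at hl
      exact ih (c :: cur) acc hacc l hl

lemma split_words_ne_nil (st : String) : ∀ w ∈ PySem.Str.split₀ st, w.toList ≠ [] := by
  intro w hw
  rw [PySem.Str.split₀] at hw
  obtain ⟨l, hl, rfl⟩ := List.mem_map.mp hw
  have := splitGo_ne_nil st.toList [] [] (by simp) l (by rw [PySem.Chars.split₀] at hl; exact hl)
  simpa using this

lemma bloop_fst : ∀ (ws : List String) (bc : Int) (bw : Option String),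
    (ws.foldl bstep (bc, bw)).1 = ws.foldl (fun a w => max a (wordMax w)) bc := by
  intro ws
  induction ws with
  | nil => intro bc bw; rfl
  | cons w t ih =>
    intro bc bw
    simp only [List.foldl_cons]
    by_cases h : wordMax w > bc
    · rw [show bstep (bc, bw) w = (wordMax w, some w) by simp [bstep, h]]
      rw [ih, max_eq_right h.le]
    · rw [show bstep (bc, bw) w = (bc, bw) by simp [bstep, h]]
      rw [ih, max_eq_left (by omega)]

lemma bloop_const : ∀ (ws : List String) (bc : Int) (bw : Option String),
    (∀ w ∈ ws, wordMax w ≤ bc) → ws.foldl bstep (bc, bw) = (bc, bw) := by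
  intro ws
  induction ws with
  | nil => intro bc bw _; rfl
  | cons w t ih =>
    intro bc bw h
    simp only [List.foldl_cons]
    rw [show bstep (bc, bw) w = (bc, bw) by
      simp only [bstep]
      rw [if_neg (by have := h w (by simp); omega)]]
    exact ih bc bw (fun u hu => h u (by simp [hu]))

lemma bloop_snd : ∀ (ws : List String) (bc : Int) (bw : Option String),
    (¬ ∀ w ∈ ws, wordMax w ≤ bc) →
    (ws.foldl bstep (bc, bw)).2
      = ws.find? (fun w => wordMax w == ws.foldl (fun a u => max a (wordMax u)) bc) := by
  intro ws
  induction ws with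
  | nil => intro bc bw h; exact absurd (by simp) h
  | cons w t ih =>
    intro bc bw h
    simp only [List.foldl_cons]
    by_cases hw : wordMax w > bc
    · rw [show bstep (bc, bw) w = (wordMax w, some w) by simp [bstep, hw],
          max_eq_right hw.le]
      by_cases ht : ∀ u ∈ t, wordMax u ≤ wordMax w
      · rw [bloop_const t _ _ ht, foldl_max_of_le _ t _ ht]
        rw [List.find?_cons_of_pos (by simp)]
      · rw [ih _ _ ht]
        have hF : wordMax w < t.foldl (fun a u => max a (wordMax u)) (wordMax w) := by
          push_neg at ht
          obtain ⟨u, hu, hgt⟩ := ht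
          have := (PySem.List.le_foldl_max_int t wordMax (wordMax w)).2 u hu
          omega
        rw [List.find?_cons_of_neg (by simp; omega)]
    · rw [show bstep (bc, bw) w = (bc, bw) by simp [bstep, hw],
          max_eq_left (by omega)]
      have ht : ¬ ∀ u ∈ t, wordMax u ≤ bc := by
        intro hall
        exact h (fun u hu => by rcases List.mem_cons.mp hu with rfl | hu; omega; exact hall u hu)
      rw [ih _ _ ht]
      have hF : bc < t.foldl (fun a u => max a (wordMax u)) bc := by
        push_neg at ht
        obtain ⟨u, hu, hgt⟩ := ht
        have := (PySem.List.le_foldl_max_int t wordMax bc).2 u hu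
        omega
      rw [List.find?_cons_of_neg (by simp; omega)]

lemma idx_find (mx : Int) : ∀ (li : List String), (∃ w ∈ li, checkA w = mx) →
    ∃ k, (li.map checkA).findIdx? (fun x => x == mx) = some k ∧
      (PySem.List.pyGet? li (k : Int)).getD "" = (li.find? (fun w => checkA w == mx)).getD "" := by
  intro li
  induction li with
  | nil => rintro ⟨w, hw, _⟩; exact absurd hw (by simp)
  | cons w t ih =>
    intro hex
    by_cases hw : checkA w = mx
    · refine ⟨0, ?_, ?_⟩
      · simp [List.findIdx?_cons, hw]
      · rw [List.find?_cons_of_pos (by simp [hw])]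
        simp [PySem.List.pyGet?_natCast]
    · have hex' : ∃ u ∈ t, checkA u = mx := by
        obtain ⟨u, hu, he⟩ := hex
        rcases List.mem_cons.mp hu with rfl | hu
        · exact absurd he hw
        · exact ⟨u, hu, he⟩
      obtain ⟨k, hk, hv⟩ := ih hex'
      refine ⟨k + 1, ?_, ?_⟩
      · simp [List.findIdx?_cons, hw, hk]
      · rw [List.find?_cons_of_neg (by simp [hw])]
        rw [show ((k + 1 : Nat) : Int) = ((k : Nat) : Int) + 1 by push_cast; ring] at *
        rw [show ((k : Int) + 1) = (((k + 1 : Nat)) : Int) by push_cast; ring]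
        rw [PySem.List.pyGet?_natCast] at hv ⊢
        simpa using hv

lemma main_eq (st : String) : LetterCountI st = LetterCountI_alt st := by
  unfold LetterCountI LetterCountI_alt
  dsimp only
  rw [show (fun (b : Int × Option String) word =>
      let m := wordMax word
      if m > b.1 then (m, some word) else b) = bstep from rfl]
  rw [show (PySem.Str.split₀ st).foldl (fun acc j => acc ++ [checkA j]) []
      = (PySem.Str.split₀ st).map checkA by
    simpa using PySem.List.foldl_append_singleton_eq_map checkA (PySem.Str.split₀ st) []]
  have hpos : ∀ v ∈ PySem.Str.split₀ st, 1 ≤ checkA v :=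
    fun v hv => checkA_pos v (split_words_ne_nil st v hv)
  cases hli : PySem.Str.split₀ st with
  | nil => simp [PySem.List.count_eq]
  | cons w t =>
    rw [hli] at hpos
    have hw1 : 1 ≤ checkA w := hpos w (by simp)
    have r1 := bloop_fst (w :: t) 0 none
    by_cases hall : PySem.List.count ((w :: t).map checkA) 1 = ((w :: t).map checkA).length
    · rw [if_pos hall]
      have hones : ∀ b ∈ (w :: t).map checkA, 1 = b :=
        List.count_eq_length.mp (by rw [PySem.List.count_eq] at hall; exact hall)
      have hle : ((w :: t).foldl bstep (0, none)).1 < 2 := by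
        rw [r1]
        have := foldl_max_le wordMax 1 (w :: t) 0 (by omega)
          (fun u hu => by rw [wordMax_eq]; exact le_of_eq (hones (checkA u) (List.mem_map_of_mem hu)).symm)
        omega
      rw [if_pos hle]
    · rw [if_neg hall]
      have hmax : PySem.List.max? ((w :: t).map checkA) (fun y => y)
          = some ((t.map checkA).foldl max (checkA w)) := by
        rw [List.map_cons]; exact PySem.List.max?_id_cons _ _
      set mx := (t.map checkA).foldl max (checkA w) with hmx
      have hgetd : (PySem.List.max? ((w :: t).map checkA) (fun y => y)).getD 0 = mx := by
        rw [hmax]; rfl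
      have hmem : mx ∈ (w :: t).map checkA := PySem.List.max?_mem hmax
      obtain ⟨v, hv, hveq⟩ := List.mem_map.mp hmem
      have hFold : (w :: t).foldl (fun a u => max a (wordMax u)) 0 = mx := by
        rw [wordMax_eq]
        simp only [List.foldl_cons]
        rw [max_eq_right (by omega : (0 : Int) ≤ checkA w)]
        rw [hmx, List.foldl_map]
      have hx2 : 2 ≤ mx := by
        have hne : ∃ b ∈ (w :: t).map checkA, ¬ (1 : Int) = b := by
          by_contra hc
          push_neg at hc
          exact hall (by rw [PySem.List.count_eq]; exact List.count_eq_length.mpr (by simpa using hc))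
        obtain ⟨b, hb, hb1⟩ := hne
        obtain ⟨u, hu, hueq⟩ := List.mem_map.mp hb
        have hble : b ≤ mx := by
          have := PySem.List.max?_isMax hmax b hb
          simpa using this
        have : 1 ≤ b := hueq ▸ hpos u hu
        omega
      have hr1 : ¬ ((w :: t).foldl bstep (0, none)).1 < 2 := by
        rw [r1, hFold]; omega
      rw [if_neg hr1]
      have hsnd : ((w :: t).foldl bstep (0, none)).2
          = (w :: t).find? (fun u => checkA u == mx) := by
        rw [bloop_snd (w :: t) 0 none (by
          intro hcontra
          have := hcontra w (by simp)
          rw [wordMax_eq] at this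
          omega)]
        rw [hFold, wordMax_eq]
      obtain ⟨k, hk, hvk⟩ := idx_find mx (w :: t) ⟨v, hv, hveq⟩
      have hidx : ((w :: t).map checkA).findIdx?
          (fun x => x == (PySem.List.max? ((w :: t).map checkA) (fun y => y)).getD 0) = some k := by
        simp only [hgetd]; exact hk
      rw [hidx, hsnd]
      exact hvk

-- ===== VERDICT (by name: the statement is the Claim_ definition above) =====
theorem LetterCountI_spec : Claim_equal_LetterCountI := by
  intro st _
  show LetterCountI st = LetterCountI_alt st
  exact main_eq st
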